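-- pv_equiv track=rewrite | github.com/MalekSnous/hNCD-scRNAseq | hNCD-scRNA Seq/algorithm_mapping.py | find_nodes_one_priorirty
-- ===== SOURCE A (Python) =====
-- def find_nodes_one_priorirty(dict_nb_neighboor,missing_number_supervised, dic_nb_voisin_all):
--
--     liste_node_candidate = []
--     for element in dict_nb_neighboor:
--         if dic_nb_voisin_all[element] - dict_nb_neighboor[element] == missing_number_supervised:
--             liste_node_candidate.append(element)
--
--     ### SELECT MOST PROBABLE NODE
--     # ici, choix, on prend les noeuds qui ont le plus de voisins ! (genre pas les feuills qui en ont que un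
--
--     liste_node_candidate_max = []
--     try :
--         nb_neighboor_max = max([dic_nb_voisin_all[i] for i in liste_node_candidate])
--
--         for element in liste_node_candidate:
--             if dic_nb_voisin_all[element] == nb_neighboor_max:
--                 liste_node_candidate_max.append(element)
--     except:
--         liste_node_candidate_max = liste_node_candidate
--     return liste_node_candidate_max
-- ===== SOURCE B (Python) =====
-- def find_nodes_one_priorirty(dict_nb_neighboor, missing_number_supervised, dic_nb_voisin_all):
--     # single running-max pass over the candidates instead of max() + re-scan
--     candidates = [e for e in dict_nb_neighboor
--                   if dic_nb_voisin_all[e] - dict_nb_neighboor[e] == missing_number_supervised]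
--     best = []
--     best_count = 0
--     for e in candidates:
--         c = dic_nb_voisin_all[e]
--         if not best or c > best_count:
--             best = [e]
--             best_count = c
--         elif c == best_count:
--             best.append(e)
--     return best
-- ===== Notes on version B (the rewrite author's own statement) =====
-- stated objective: simpler
-- what changed: The max()-then-rescan two-pass with its try/except is replaced by a single running-max pass over the candidates that resets the result list on a strictly greater count and appends on ties; the empty-candidate case falls out naturally so the exception handler disappears.
import Mathlib
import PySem

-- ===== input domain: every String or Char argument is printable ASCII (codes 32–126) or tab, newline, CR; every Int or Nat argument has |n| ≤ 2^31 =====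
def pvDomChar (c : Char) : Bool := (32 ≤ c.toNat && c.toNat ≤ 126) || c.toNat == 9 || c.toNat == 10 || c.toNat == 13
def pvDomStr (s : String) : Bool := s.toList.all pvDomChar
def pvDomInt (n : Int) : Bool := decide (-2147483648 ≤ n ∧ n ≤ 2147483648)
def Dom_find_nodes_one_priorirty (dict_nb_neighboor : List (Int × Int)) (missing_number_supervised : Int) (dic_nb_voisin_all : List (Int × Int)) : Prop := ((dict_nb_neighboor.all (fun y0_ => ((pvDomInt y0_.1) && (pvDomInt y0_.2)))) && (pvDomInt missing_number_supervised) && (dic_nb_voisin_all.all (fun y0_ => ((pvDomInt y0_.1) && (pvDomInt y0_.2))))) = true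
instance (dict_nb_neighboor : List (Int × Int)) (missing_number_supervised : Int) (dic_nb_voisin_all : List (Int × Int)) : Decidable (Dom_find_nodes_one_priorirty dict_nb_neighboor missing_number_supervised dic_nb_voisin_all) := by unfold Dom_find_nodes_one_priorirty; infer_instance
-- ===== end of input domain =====

-- B replaces A's max()-then-rescan (with try/except for the empty case) by a single
-- running-max pass over the candidates; same values, simpler control flow.


-- ===== PORT A =====
def find_nodes_one_priorirty (dict_nb_neighboor : List (Int × Int)) (missing_number_supervised : Int) (dic_nb_voisin_all : List (Int × Int)) : List Int :=
  let dA := PySem.Dict.ofList dict_nb_neighboor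
  let dV := PySem.Dict.ofList dic_nb_voisin_all
  -- for element in dict_nb_neighboor: if dic_nb_voisin_all[element] - dict_nb_neighboor[element] == missing: append
  -- (getD _ 0 is exact under Pre_: every looked-up key is present)
  let liste_node_candidate :=
    dA.keys.foldl (fun acc e =>
      if dV.getD e 0 - dA.getD e 0 = missing_number_supervised then acc ++ [e] else acc) []
  -- try: nb_neighboor_max = max([...]); rescan  except: return the candidate list (empty)
  match PySem.List.max? (liste_node_candidate.map (fun i => dV.getD i 0)) (fun y => y) with
  | none => liste_node_candidate
  | some nb_neighboor_max =>
      liste_node_candidate.foldl (fun acc e =>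
        if dV.getD e 0 = nb_neighboor_max then acc ++ [e] else acc) []

-- ===== PORT B =====
def find_nodes_one_priorirty_alt (dict_nb_neighboor : List (Int × Int)) (missing_number_supervised : Int) (dic_nb_voisin_all : List (Int × Int)) : List Int :=
  let dA := PySem.Dict.ofList dict_nb_neighboor
  let dV := PySem.Dict.ofList dic_nb_voisin_all
  let candidates :=
    dA.keys.foldl (fun acc e =>
      if dV.getD e 0 - dA.getD e 0 = missing_number_supervised then acc ++ [e] else acc) []
  -- single running-max pass: reset on strictly greater, append on tie
  (candidates.foldl (fun (st : List Int × Int) e =>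
      let c := dV.getD e 0
      if st.1 = [] ∨ st.2 < c then ([e], c)
      else if c = st.2 then (st.1 ++ [e], st.2)
      else st) (([] : List Int), (0 : Int))).1

-- ===== PRECONDITION & SPEC =====
-- Pre_ excludes inputs where some key of dict_nb_neighboor is absent from dic_nb_voisin_all,
-- on which the Python A raises KeyError in its first loop.
def Pre_find_nodes_one_priorirty (dict_nb_neighboor : List (Int × Int)) (missing_number_supervised : Int) (dic_nb_voisin_all : List (Int × Int)) : Prop :=
  ((PySem.Dict.ofList dict_nb_neighboor).keys.all
    (fun k => (PySem.Dict.ofList dic_nb_voisin_all).contains k)) = true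
instance (dict_nb_neighboor : List (Int × Int)) (missing_number_supervised : Int) (dic_nb_voisin_all : List (Int × Int)) : Decidable (Pre_find_nodes_one_priorirty dict_nb_neighboor missing_number_supervised dic_nb_voisin_all) := by unfold Pre_find_nodes_one_priorirty; infer_instance
def pvWitness_find_nodes_one_priorirty : (List (Int × Int)) × Int × (List (Int × Int)) := ([(1, 2)], 1, [(1, 3), (2, 0)])

def Spec_find_nodes_one_priorirty (dict_nb_neighboor : List (Int × Int)) (missing_number_supervised : Int) (dic_nb_voisin_all : List (Int × Int)) (out : List Int) : Prop := out = find_nodes_one_priorirty_alt dict_nb_neighboor missing_number_supervised dic_nb_voisin_all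
instance (dict_nb_neighboor : List (Int × Int)) (missing_number_supervised : Int) (dic_nb_voisin_all : List (Int × Int)) (out : List Int) : Decidable (Spec_find_nodes_one_priorirty dict_nb_neighboor missing_number_supervised dic_nb_voisin_all out) := by unfold Spec_find_nodes_one_priorirty; infer_instance

-- ===== CLAIM (what is proved, stated in full; the proofs are below) =====
def Claim_equal_find_nodes_one_priorirty : Prop := ∀ (dict_nb_neighboor : List (Int × Int)) (missing_number_supervised : Int) (dic_nb_voisin_all : List (Int × Int)), Dom_find_nodes_one_priorirty dict_nb_neighboor missing_number_supervised dic_nb_voisin_all → Pre_find_nodes_one_priorirty dict_nb_neighboor missing_number_supervised dic_nb_voisin_all → Spec_find_nodes_one_priorirty dict_nb_neighboor missing_number_supervised dic_nb_voisin_all (find_nodes_one_priorirty dict_nb_neighboor missing_number_supervised dic_nb_voisin_all)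

-- ===== LEMMAS AND PROOFS =====

-- running maximum of f over l starting from m
def pvFoldMax (f : Int → Int) (l : List Int) (m : Int) : Int :=
  l.foldl (fun a e => max a (f e)) m

theorem pvFoldMax_le (f : Int → Int) (l : List Int) (m : Int) : m ≤ pvFoldMax f l m := by
  induction l generalizing m with
  | nil => simp [pvFoldMax]
  | cons e t ih =>
      have h := ih (max m (f e))
      simp only [pvFoldMax, List.foldl_cons] at h ⊢
      exact le_trans (le_max_left _ _) h

-- invariant of B's running-max fold starting from a nonempty result list
theorem pvFoldB_inv (f : Int → Int) (l : List Int) (acc : List Int) (m : Int) (hacc : acc ≠ []) :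
    l.foldl (fun (st : List Int × Int) e =>
        let c := f e
        if st.1 = [] ∨ st.2 < c then ([e], c)
        else if c = st.2 then (st.1 ++ [e], st.2)
        else st) (acc, m)
    = ((if pvFoldMax f l m = m then acc else []) ++ l.filter (fun e => f e = pvFoldMax f l m),
       pvFoldMax f l m) := by
  induction l generalizing acc m with
  | nil => simp [pvFoldMax]
  | cons e t ih =>
      simp only [List.foldl_cons]
      by_cases hgt : m < f e
      · have hcond : (acc = [] ∨ m < f e) := Or.inr hgt
        simp only [if_pos hcond]
        have hM : pvFoldMax f (e :: t) m = pvFoldMax f t (f e) := by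
          simp [pvFoldMax, max_eq_right (le_of_lt hgt)]
        have hMe : f e ≤ pvFoldMax f t (f e) := pvFoldMax_le f t (f e)
        have hMm : pvFoldMax f (e :: t) m ≠ m := by
          rw [hM]; omega
        rw [ih [e] (f e) (by simp)]
        rw [hM] at hMm ⊢
        simp only [if_neg hMm, List.filter_cons]
        by_cases he : f e = pvFoldMax f t (f e)
        · simp [decide_eq_true he, if_pos he.symm]
        · have he' : pvFoldMax f t (f e) ≠ f e := fun h => he h.symm
          simp [he, he']
      · have hcond : ¬ (acc = [] ∨ m < f e) := by
          intro h; rcases h with h | h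
          · exact hacc h
          · exact hgt h
        simp only [if_neg hcond]
        have hM : pvFoldMax f (e :: t) m = pvFoldMax f t m := by
          simp [pvFoldMax, max_eq_left (by omega : f e ≤ m)]
        by_cases heq : f e = m
        · simp only [if_pos heq]
          rw [ih (acc ++ [e]) m (by simp)]
          rw [hM]
          by_cases hMm : pvFoldMax f t m = m
          · simp [hMm, heq, List.append_assoc]
          · have : f e ≠ pvFoldMax f t m := by rw [heq]; exact fun h => hMm h.symm
            simp [hMm, this]
        · simp only [if_neg heq]
          rw [ih acc m hacc, hM]
          have hlt : f e < m := lt_of_le_of_ne (by omega) heq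
          have : f e ≠ pvFoldMax f t m := by
            have := pvFoldMax_le f t m; omega
          simp [this]

-- both sides reduce to: filter the candidates by "count = maximum count"
theorem pv_core (f : Int → Int) (cand : List Int) :
    (match PySem.List.max? (cand.map f) (fun y => y) with
     | none => cand
     | some m => cand.foldl (fun acc e => if f e = m then acc ++ [e] else acc) [])
    = (cand.foldl (fun (st : List Int × Int) e =>
        let c := f e
        if st.1 = [] ∨ st.2 < c then ([e], c)
        else if c = st.2 then (st.1 ++ [e], st.2)
        else st) (([] : List Int), (0 : Int))).1 := by
  cases cand with
  | nil => simp [PySem.List.max?]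
  | cons x xs =>
      have hmax : PySem.List.max? ((x :: xs).map f) (fun y => y)
          = some ((xs.map f).foldl max (f x)) := by
        simp [PySem.List.max?_id_cons]
      have hfm : (xs.map f).foldl max (f x) = pvFoldMax f xs (f x) := by
        simp [pvFoldMax, List.foldl_map]
      rw [hmax, hfm]
      show List.foldl (fun acc e => if f e = pvFoldMax f xs (f x) then acc ++ [e] else acc) [] (x :: xs)
          = (List.foldl (fun (st : List Int × Int) e =>
              let c := f e
              if st.1 = [] ∨ st.2 < c then ([e], c)
              else if c = st.2 then (st.1 ++ [e], st.2)
              else st) (([] : List Int), (0 : Int)) (x :: xs)).1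
      rw [PySem.List.foldl_append_ite_eq_filter]
      simp only [List.foldl_cons, true_or, if_true]
      rw [pvFoldB_inv f xs [x] (f x) (by simp)]
      simp only [List.nil_append, List.filter_cons]
      by_cases hx : f x = pvFoldMax f xs (f x)
      · simp [decide_eq_true hx, if_pos hx.symm]
      · have hx' : pvFoldMax f xs (f x) ≠ f x := fun h => hx h.symm
        simp [hx, hx']

-- ===== VERDICT (by name: the statement is the Claim_ definition above) =====
theorem find_nodes_one_priorirty_spec : Claim_equal_find_nodes_one_priorirty := by
  intro dnn mns dva _ _
  unfold Spec_find_nodes_one_priorirty find_nodes_one_priorirty find_nodes_one_priorirty_alt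
  exact pv_core _ _
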